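-- pv_equiv track=rewrite | github.com/ArturRegadas/Competitive_Programming | feats.py | termination
-- ===== SOURCE A (Python) =====
-- def termination(string: str) -> str:
--     ans = ""
--     flag = False
--     for i in string:
--         if i == "." or flag:
--             ans += i
--             flag = True
--     return ans
-- ===== SOURCE B (Python) =====
-- def termination(string: str) -> str:
--     i = string.find('.')
--     return string[i:] if i >= 0 else ''
-- ===== Notes on version B (the rewrite author's own statement) =====
-- stated objective: simpler
-- what changed: Replaced the character-by-character accumulation loop with flag state by a single find of the first dot followed by one slice.
import Mathlib
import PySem

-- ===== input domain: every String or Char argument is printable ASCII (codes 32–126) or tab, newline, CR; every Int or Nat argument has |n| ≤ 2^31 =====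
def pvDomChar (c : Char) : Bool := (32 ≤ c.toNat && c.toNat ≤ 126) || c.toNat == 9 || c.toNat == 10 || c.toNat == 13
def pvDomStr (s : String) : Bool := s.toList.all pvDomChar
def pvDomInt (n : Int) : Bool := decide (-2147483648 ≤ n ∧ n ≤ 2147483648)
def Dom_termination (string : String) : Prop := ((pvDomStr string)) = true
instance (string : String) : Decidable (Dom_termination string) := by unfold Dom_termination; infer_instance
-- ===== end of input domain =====

-- B replaces A's accumulation loop with flag state by find-first-dot + slice (simpler).

-- ===== PORT A =====
-- the loop: for i in string: if i == "." or flag: ans += i; flag = True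
def terminationStep (st : List Char × Bool) (c : Char) : List Char × Bool :=
  if c == '.' || st.2 then (st.1 ++ [c], true) else st

def termination (string : String) : String :=
  String.ofList (string.toList.foldl terminationStep ([], false)).1

-- ===== PORT B =====
def termination_alt (string : String) : String :=
  let i := PySem.Str.find string "."
  if 0 ≤ i then String.ofList (PySem.List.slice string.toList (some i) none) else ""

-- ===== PRECONDITION & SPEC =====
def Spec_termination (string : String) (out : String) : Prop := out = termination_alt string
instance (string : String) (out : String) : Decidable (Spec_termination string out) := by unfold Spec_termination; infer_instance

-- ===== CLAIM (what is proved, stated in full; the proofs are below) =====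
def Claim_equal_termination : Prop := ∀ (string : String), Dom_termination string → Spec_termination string (termination string)

-- ===== LEMMAS AND PROOFS =====

-- once the flag is set, the rest of the string is appended
theorem foldl_step_flag (s acc : List Char) :
    s.foldl terminationStep (acc, true) = (acc ++ s, true) := by
  induction s generalizing acc with
  | nil => simp
  | cons c t ih => simp [terminationStep, ih]

-- A's loop computes dropWhile (· ≠ '.')
theorem termA_eq_dropWhile (s : List Char) :
    (s.foldl terminationStep ([], false)).1 = s.dropWhile (fun c => !(c == '.')) := by
  induction s with
  | nil => rfl
  | cons c t ih =>
    by_cases h : c = '.'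
    · simp [h, terminationStep, foldl_step_flag, List.dropWhile]
    · have hb : (c == '.') = false := beq_eq_false_iff_ne.mpr h
      simp [List.foldl_cons, terminationStep, hb, ih, List.dropWhile]

theorem singleton_prefix_iff (c : Char) (t : List Char) :
    [c] <+: t ↔ t.head? = some c := by
  cases t with
  | nil => simp
  | cons a u => simp [List.cons_prefix_cons, eq_comm]

theorem dropWhile_eq_drop_of_first (s : List Char) (j : Nat)
    (hj : s[j]? = some '.') (hlt : ∀ i, i < j → s[i]? ≠ some '.') :
    s.dropWhile (fun c => !(c == '.')) = s.drop j := by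
  induction s generalizing j with
  | nil => simp at hj
  | cons a t ih =>
    cases j with
    | zero =>
      simp at hj
      simp [List.dropWhile, hj]
    | succ k =>
      have ha : a ≠ '.' := by
        have := hlt 0 (Nat.succ_pos k); simpa using this
      simp only [List.getElem?_cons_succ] at hj
      have hlt' : ∀ i, i < k → t[i]? ≠ some '.' := by
        intro i hi
        have := hlt (i + 1) (by omega)
        simpa using this
      have hb : (a == '.') = false := beq_eq_false_iff_ne.mpr ha
      simp [List.dropWhile, hb, ih k hj hlt']

-- ===== VERDICT (by name: the statement is the Claim_ definition above) =====
theorem termination_spec : Claim_equal_termination := by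
  intro s _
  unfold Spec_termination termination termination_alt
  simp only [PySem.Str.find_eq]
  have hdot : (".".toList : List Char) = ['.'] := rfl
  by_cases hmem : '.' ∈ s.toList
  · -- find succeeds
    have hne : PySem.Chars.find s.toList ".".toList ≠ -1 := by
      rw [hdot, Ne, PySem.Chars.find_eq_neg_one_iff]
      obtain ⟨l1, l2, h⟩ := List.append_of_mem hmem
      exact fun h' => h' ⟨l1, l2, by simp [h]⟩
    have hspec := PySem.Chars.findFrom_natCast_spec s.toList ".".toList 0 (Nat.zero_le _)
      (by simpa using hne)
    rw [show ((0:Nat):Int) = 0 from rfl, PySem.Chars.findFrom_zero] at hspec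
    obtain ⟨h0, hpre, hmin⟩ := hspec
    set i := PySem.Chars.find s.toList ".".toList with hi
    have hipos : 0 ≤ i := h0
    rw [if_pos hipos, PySem.List.slice_from (ha := hipos)]
    rw [termA_eq_dropWhile]
    congr 1
    apply dropWhile_eq_drop_of_first
    · rw [hdot] at hpre
      rw [singleton_prefix_iff] at hpre
      simpa [List.head?_drop] using hpre
    · intro k hk
      have := hmin k (Nat.zero_le _) (by omega)
      rw [hdot, singleton_prefix_iff] at this
      simpa [List.head?_drop] using this
  · -- no dot: find = -1
    have : PySem.Chars.find s.toList ".".toList = -1 := by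
      rw [hdot, PySem.Chars.find_eq_neg_one_iff]
      intro ⟨l1, l2, h⟩
      exact hmem (by rw [← h]; simp)
    rw [this, if_neg (by norm_num)]
    rw [termA_eq_dropWhile]
    have : s.toList.dropWhile (fun c => !(c == '.')) = [] := by
      rw [List.dropWhile_eq_nil_iff]
      intro x hx
      have : x ≠ '.' := fun h => hmem (h ▸ hx)
      simp [this]
    simp [this]
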